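-- pv_equiv track=rewrite | github.com/Fostonger/graph-rag | src/graphrag/db/queries.py | _categorize_relationships
-- ===== SOURCE A (Python) =====
-- from collections import defaultdict, deque
-- from typing import Any, Dict, Iterable, List, Optional, Set, Tuple
--
-- def _categorize_relationships(
--     relationships: List[Dict[str, Any]]
-- ) -> Tuple[
--     Dict[str, List[Dict[str, Any]]],
--     Dict[str, List[Dict[str, Any]]],
--     Dict[str, List[Dict[str, Any]]],
--     List[Dict[str, Any]],
-- ]:
--     creates_by_child: Dict[str, List[Dict[str, Any]]] = defaultdict(list)
--     creates_by_parent: Dict[str, List[Dict[str, Any]]] = defaultdict(list)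
--     refs_outgoing: Dict[str, List[Dict[str, Any]]] = defaultdict(list)
--     references: List[Dict[str, Any]] = []
--     for rel in relationships:
--         if rel["edge_type"] == "creates":
--             parent_id = rel["source_stable_id"]
--             child_id = rel.get("target_stable_id")
--             creates_by_parent[parent_id].append(rel)
--             if child_id:
--                 creates_by_child[child_id].append(rel)
--         else:
--             refs_outgoing[rel["source_stable_id"]].append(rel)
--             references.append(rel)
--     return creates_by_child, creates_by_parent, refs_outgoing, references
-- ===== SOURCE B (Python) =====
-- from collections import defaultdict
-- from typing import Any, Dict, List, Tuple
--
-- def _categorize_relationships(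
--     relationships: List[Dict[str, Any]]
-- ) -> Tuple[
--     Dict[str, List[Dict[str, Any]]],
--     Dict[str, List[Dict[str, Any]]],
--     Dict[str, List[Dict[str, Any]]],
--     List[Dict[str, Any]],
-- ]:
--     creates: List[Dict[str, Any]] = []
--     rest: List[Dict[str, Any]] = []
--     for rel in relationships:
--         (creates if rel["edge_type"] == "creates" else rest).append(rel)
--     creates_by_parent: Dict[str, List[Dict[str, Any]]] = defaultdict(list)
--     for rel in creates:
--         creates_by_parent[rel["source_stable_id"]].append(rel)
--     creates_by_child: Dict[str, List[Dict[str, Any]]] = defaultdict(list)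
--     for rel in creates:
--         child_id = rel.get("target_stable_id")
--         if child_id:
--             creates_by_child[child_id].append(rel)
--     refs_outgoing: Dict[str, List[Dict[str, Any]]] = defaultdict(list)
--     for rel in rest:
--         refs_outgoing[rel["source_stable_id"]].append(rel)
--     return creates_by_child, creates_by_parent, refs_outgoing, rest
-- ===== Notes on version B (the rewrite author's own statement) =====
-- stated objective: alternative
-- what changed: A buckets everything in one loop over four simultaneous accumulators; B first partitions the rows into creates/others, then builds each of the three groupings in its own independent pass.
import Mathlib
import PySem

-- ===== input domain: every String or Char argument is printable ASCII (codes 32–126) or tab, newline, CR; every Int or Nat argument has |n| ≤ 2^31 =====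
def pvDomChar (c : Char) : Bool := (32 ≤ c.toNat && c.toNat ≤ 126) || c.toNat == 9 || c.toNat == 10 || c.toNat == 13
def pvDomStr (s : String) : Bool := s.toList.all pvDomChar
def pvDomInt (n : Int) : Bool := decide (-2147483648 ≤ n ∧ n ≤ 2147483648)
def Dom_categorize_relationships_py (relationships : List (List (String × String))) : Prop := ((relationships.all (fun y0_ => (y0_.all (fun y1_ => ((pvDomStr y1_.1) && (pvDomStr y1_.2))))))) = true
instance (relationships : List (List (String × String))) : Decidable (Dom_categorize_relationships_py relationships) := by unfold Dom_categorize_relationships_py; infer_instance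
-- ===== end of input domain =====

-- B partitions the rows into creates/others first, then builds each grouping in its own pass
-- (alternative decomposition, same cost); A = B wherever A returns (Pre_ excludes rows whose missing keys make A raise KeyError).


-- shared helpers: a row is a Python dict (assoc list, first match wins)
-- rel[k] read as getD with ""; under Pre_ the keys A subscripts are present, so the default is never reached
def pvGetS (rel : List (String × String)) (k : String) : String :=
  (PySem.Dict.mk rel).getD k ""

-- rel.get(k) : Option
def pvGet? (rel : List (String × String)) (k : String) : Option String :=
  (PySem.Dict.mk rel).get? k

abbrev pvD := PySem.Dict String (List (List (String × String)))

-- ===== PORT A =====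
-- A's loop body: one pass, each row touches up to three defaultdicts and the references list
def pvStepA (st : pvD × pvD × pvD × List (List (String × String))) (rel : List (String × String)) :
    pvD × pvD × pvD × List (List (String × String)) :=
  let (cbc, cbp, ro, refs) := st
  if pvGetS rel "edge_type" == "creates" then
    let parent_id := pvGetS rel "source_stable_id"
    let child_id := pvGet? rel "target_stable_id"
    let cbp := cbp.modify parent_id [] (· ++ [rel])
    let cbc := match child_id with
      | some c => if c ≠ "" then cbc.modify c [] (· ++ [rel]) else cbc
      | none => cbc
    (cbc, cbp, ro, refs)
  else
    (cbc, cbp, ro.modify (pvGetS rel "source_stable_id") [] (· ++ [rel]), refs ++ [rel])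

def categorize_relationships_py (relationships : List (List (String × String))) : (List (String × List (List (String × String)))) × (List (String × List (List (String × String)))) × (List (String × List (List (String × String)))) × (List (List (String × String))) :=
  let st := relationships.foldl pvStepA (PySem.Dict.empty, PySem.Dict.empty, PySem.Dict.empty, [])
  (st.1.items, st.2.1.items, st.2.2.1.items, st.2.2.2)

-- ===== PORT B =====
def pvIsCreates (rel : List (String × String)) : Bool := pvGetS rel "edge_type" == "creates"

-- defaultdict(list) grouping by source_stable_id over an already-partitioned list
def pvStepSrc (d : pvD) (rel : List (String × String)) : pvD :=
  d.modify (pvGetS rel "source_stable_id") [] (· ++ [rel])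

-- defaultdict(list) grouping by truthy target_stable_id
def pvStepChild (d : pvD) (rel : List (String × String)) : pvD :=
  match pvGet? rel "target_stable_id" with
  | some c => if c ≠ "" then d.modify c [] (· ++ [rel]) else d
  | none => d

def categorize_relationships_py_alt (relationships : List (List (String × String))) : (List (String × List (List (String × String)))) × (List (String × List (List (String × String)))) × (List (String × List (List (String × String)))) × (List (List (String × String))) :=
  -- first pass: partition the rows by edge_type
  let p := relationships.foldl
    (fun (p : List (List (String × String)) × List (List (String × String))) rel =>
      if pvIsCreates rel then (p.1 ++ [rel], p.2) else (p.1, p.2 ++ [rel])) ([], [])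
  let creates := p.1
  let rest := p.2
  -- three independent grouping passes
  let creates_by_parent := creates.foldl pvStepSrc PySem.Dict.empty
  let creates_by_child := creates.foldl pvStepChild PySem.Dict.empty
  let refs_outgoing := rest.foldl pvStepSrc PySem.Dict.empty
  (creates_by_child.items, creates_by_parent.items, refs_outgoing.items, rest)

-- ===== PRECONDITION & SPEC =====
-- Pre_ excludes rows missing the "edge_type" or "source_stable_id" key, on which Python A raises KeyError.
def Pre_categorize_relationships_py (relationships : List (List (String × String))) : Prop :=
  ∀ rel ∈ relationships, "edge_type" ∈ rel.map (·.1) ∧ "source_stable_id" ∈ rel.map (·.1)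
  -- (the optional "target_stable_id" key is read with .get, so it may be absent; a missing "creates"-branch key raises)
instance (relationships : List (List (String × String))) : Decidable (Pre_categorize_relationships_py relationships) := by unfold Pre_categorize_relationships_py; infer_instance

def pvWitness_categorize_relationships_py : (List (List (String × String))) :=
  [[("edge_type", "creates"), ("source_stable_id", "fn_a"), ("target_stable_id", "fn_b")],
   [("edge_type", "imports"), ("source_stable_id", "fn_b")],
   [("edge_type", "creates"), ("source_stable_id", "fn_a"), ("target_stable_id", "")]]

def Spec_categorize_relationships_py (relationships : List (List (String × String))) (out : (List (String × List (List (String × String)))) × (List (String × List (List (String × String)))) × (List (String × List (List (String × String)))) × (List (List (String × String)))) : Prop := out = categorize_relationships_py_alt relationships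
instance (relationships : List (List (String × String))) (out : (List (String × List (List (String × String)))) × (List (String × List (List (String × String)))) × (List (String × List (List (String × String)))) × (List (List (String × String)))) : Decidable (Spec_categorize_relationships_py relationships out) := by
  unfold Spec_categorize_relationships_py
  have h2 : DecidableEq (List (List (String × String))) := inferInstance
  have h1 : DecidableEq (List (String × List (List (String × String)))) := inferInstance
  exact @instDecidableEqProd _ _ h1 (@instDecidableEqProd _ _ h1 (@instDecidableEqProd _ _ h1 h2)) out _

-- ===== CLAIM (what is proved, stated in full; the proofs are below) =====
def Claim_equal_categorize_relationships_py : Prop := ∀ (relationships : List (List (String × String))), Dom_categorize_relationships_py relationships → Pre_categorize_relationships_py relationships → Spec_categorize_relationships_py relationships (categorize_relationships_py relationships)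

-- ===== LEMMAS AND PROOFS =====

lemma pvStepA_pos (cbc cbp ro : pvD) (refs : List (List (String × String)))
    (rel : List (String × String)) (h : pvIsCreates rel = true) :
    pvStepA (cbc, cbp, ro, refs) rel = (pvStepChild cbc rel, pvStepSrc cbp rel, ro, refs) := by
  unfold pvIsCreates at h
  simp [pvStepA, pvStepChild, pvStepSrc, h]

lemma pvStepA_neg (cbc cbp ro : pvD) (refs : List (List (String × String)))
    (rel : List (String × String)) (h : pvIsCreates rel = false) :
    pvStepA (cbc, cbp, ro, refs) rel = (cbc, cbp, pvStepSrc ro rel, refs ++ [rel]) := by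
  unfold pvIsCreates at h
  simp [pvStepA, pvStepSrc, h]

-- A's single loop, started anywhere, equals B's three grouping passes over the filtered lists.
lemma pvLoopA_eq (rels : List (List (String × String)))
    (cbc cbp ro : pvD) (refs : List (List (String × String))) :
    rels.foldl pvStepA (cbc, cbp, ro, refs) =
      ((rels.filter pvIsCreates).foldl pvStepChild cbc,
       (rels.filter pvIsCreates).foldl pvStepSrc cbp,
       (rels.filter (fun r => !pvIsCreates r)).foldl pvStepSrc ro,
       refs ++ rels.filter (fun r => !pvIsCreates r)) := by
  induction rels generalizing cbc cbp ro refs with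
  | nil => simp
  | cons rel rels ih =>
    rw [List.foldl_cons]
    by_cases h : pvIsCreates rel = true
    · rw [pvStepA_pos _ _ _ _ _ h, ih]
      simp [h]
    · rw [pvStepA_neg _ _ _ _ _ (by simpa using h), ih]
      simp only [Bool.not_eq_true] at h
      simp [h]

-- B's partition pass, started anywhere, yields the two filters.
lemma pvPartition_eq (rels : List (List (String × String)))
    (a b : List (List (String × String))) :
    rels.foldl (fun (p : List (List (String × String)) × List (List (String × String))) rel =>
        if pvIsCreates rel then (p.1 ++ [rel], p.2) else (p.1, p.2 ++ [rel])) (a, b) =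
      (a ++ rels.filter pvIsCreates, b ++ rels.filter (fun r => !pvIsCreates r)) := by
  induction rels generalizing a b with
  | nil => simp
  | cons rel rels ih =>
    by_cases h : pvIsCreates rel = true
    · simp [h, ih]
    · simp only [Bool.not_eq_true] at h
      simp [h, ih]

-- ===== VERDICT (by name: the statement is the Claim_ definition above) =====
theorem categorize_relationships_py_spec : Claim_equal_categorize_relationships_py := by
  intro rels _ _
  unfold Spec_categorize_relationships_py categorize_relationships_py categorize_relationships_py_alt
  rw [pvLoopA_eq, pvPartition_eq]
  simp
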